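-- pv_equiv track=rewrite | github.com/SWORDIntel/NEWAS | src/nem/nlp/patterns.py | split_compound_request
-- ===== SOURCE A (Python) =====
-- from typing import Dict, List, Tuple, Optional
--
-- def split_compound_request(text: str) -> List[str]:
--     """Split compound requests into individual tasks"""
--     # Split on conjunctions and punctuation
--     delimiters = [' and ', ' then ', '. ', ', and ', ', then ', '; ']
--
--     parts = [text]
--     for delimiter in delimiters:
--         new_parts = []
--         for part in parts:
--             new_parts.extend(part.split(delimiter))
--         parts = new_parts
--
--     # Clean and filter parts
--     return [p.strip() for p in parts if p.strip() and len(p.strip()) > 3]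
-- ===== SOURCE B (Python) =====
-- from typing import List
--
--
-- def split_compound_request(text: str) -> List[str]:
--     """Split compound requests into individual tasks"""
--     # Only four delimiters are ever live: splitting on ' and ' / ' then ' first
--     # consumes every occurrence of ', and ' / ', then ', so those two are dead.
--     delimiters = (' and ', ' then ', '. ', '; ')
--
--     def explode(part: str, i: int) -> List[str]:
--         if i == len(delimiters):
--             return [part]
--         return [q for p in part.split(delimiters[i]) for q in explode(p, i + 1)]
--
--     return [p.strip() for p in explode(text, 0) if p.strip() and len(p.strip()) > 3]
-- ===== Notes on version B (the rewrite author's own statement) =====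
-- stated objective: simpler
-- what changed: Drops the two dead delimiters ', and ' and ', then ' (every occurrence is already consumed by the earlier ' and '/' then ' splits) and replaces the breadth-first per-delimiter rebuild loop with a piece-wise recursive explode over the four live delimiters.
import Mathlib
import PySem

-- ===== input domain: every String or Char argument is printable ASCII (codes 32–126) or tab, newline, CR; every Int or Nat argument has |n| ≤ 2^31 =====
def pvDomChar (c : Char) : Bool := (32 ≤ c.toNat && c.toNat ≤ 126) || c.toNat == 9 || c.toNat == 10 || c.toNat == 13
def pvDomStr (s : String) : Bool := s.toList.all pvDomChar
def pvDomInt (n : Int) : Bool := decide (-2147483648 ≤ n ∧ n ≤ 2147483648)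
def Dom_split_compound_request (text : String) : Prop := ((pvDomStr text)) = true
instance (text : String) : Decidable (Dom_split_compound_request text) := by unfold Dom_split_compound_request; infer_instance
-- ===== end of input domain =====

-- B drops the two dead delimiters and recurses piece-wise over the four live ones (simpler; return value only, no mutation involved).

-- shared helper: Python's part.split(delimiter) for a non-empty delimiter (both Pythons call str.split)
def pvSplitPy (s sep : String) : List String :=
  (PySem.Chars.splitOn s.toList sep.toList).map String.ofList

-- ===== PORT A =====
def split_compound_request (text : String) : List String :=
  let delimiters : List String := [" and ", " then ", ". ", ", and ", ", then ", "; "]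
  let parts := delimiters.foldl
    (fun parts delimiter => parts.foldl (fun newParts part => newParts ++ pvSplitPy part delimiter) [])
    [text]
  (parts.filter (fun p => !(PySem.Str.strip p == "") && decide (3 < PySem.Str.len (PySem.Str.strip p)))).map PySem.Str.strip

-- ===== PORT B =====
-- Source B's recursive explode(part, i) over the tuple of four live delimiters
def pvAltExplode (ds : List String) (part : String) : List String :=
  match ds with
  | [] => [part]
  | d :: rest => (pvSplitPy part d).flatMap (pvAltExplode rest)

def split_compound_request_alt (text : String) : List String :=
  ((pvAltExplode [" and ", " then ", ". ", "; "] text).filter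
    (fun p => !(PySem.Str.strip p == "") && decide (3 < PySem.Str.len (PySem.Str.strip p)))).map PySem.Str.strip

-- ===== PRECONDITION & SPEC =====
def Spec_split_compound_request (text : String) (out : List String) : Prop := out = split_compound_request_alt text
instance (text : String) (out : List String) : Decidable (Spec_split_compound_request text out) := by unfold Spec_split_compound_request; infer_instance

-- ===== CLAIM (what is proved, stated in full; the proofs are below) =====
def Claim_equal_split_compound_request : Prop := ∀ (text : String), Dom_split_compound_request text → Spec_split_compound_request text (split_compound_request text)

-- ===== LEMMAS AND PROOFS =====

-- a clean structural model of PySem.Chars.splitOn (used only in proofs)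
def pvFSplit (sep : List Char) : List Char → List (List Char)
  | [] => [[]]
  | c :: rest =>
    if 0 < sep.length ∧ sep.isPrefixOf (c :: rest) then
      [] :: pvFSplit sep (List.drop sep.length (c :: rest))
    else
      match pvFSplit sep rest with
      | [] => [[c]]
      | p :: ps => (c :: p) :: ps
termination_by l => l.length
decreasing_by
  · simp only [List.length_drop, List.length_cons]; omega
  · simp

theorem pvFSplit_ne_nil (sep l) : pvFSplit sep l ≠ [] := by
  cases l with
  | nil => simp [pvFSplit]
  | cons c rest =>
    rw [pvFSplit]
    split
    · simp
    · split <;> simp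

-- the first piece is a prefix of the input
theorem pvFSplit_head_prefix (sep : List Char) (l : List Char) :
    ∀ p ps, pvFSplit sep l = p :: ps → p <+: l := by
  induction l using pvFSplit.induct sep with
  | case1 => intro p ps h; simp [pvFSplit] at h; simp [h.1]
  | case2 c rest h ih =>
    intro p ps hh
    rw [pvFSplit, if_pos h] at hh
    simp only [List.cons.injEq] at hh
    simp [← hh.1]
  | case3 c rest h hnil ih =>
    intro p ps hh
    exact absurd hnil (pvFSplit_ne_nil sep rest)
  | case4 c rest h q qs hq ih =>
    intro p ps hh
    rw [pvFSplit, if_neg h, hq] at hh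
    simp only [List.cons.injEq] at hh
    rcases hh with ⟨rfl, rfl⟩
    exact (List.cons_prefix_cons).2 ⟨rfl, ih q qs hq⟩

-- pieces contain no occurrence of the separator
theorem pvFSplit_not_infix (sep : List Char) (hsep : sep ≠ []) (l : List Char) :
    ∀ p ∈ pvFSplit sep l, ¬ sep <:+: p := by
  induction l using pvFSplit.induct sep with
  | case1 =>
    intro p hp
    simp [pvFSplit] at hp
    subst hp
    intro hinf
    exact hsep (List.eq_nil_of_infix_nil hinf)
  | case2 c rest h ih =>
    intro p hp
    rw [pvFSplit, if_pos h] at hp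
    rcases List.mem_cons.1 hp with rfl | hp
    · intro hinf; exact hsep (List.eq_nil_of_infix_nil hinf)
    · exact ih p hp
  | case3 c rest h hnil ih => exact absurd hnil (pvFSplit_ne_nil sep rest)
  | case4 c rest h q qs hq ih =>
    intro p hp
    rw [pvFSplit, if_neg h, hq] at hp
    rcases List.mem_cons.1 hp with rfl | hp
    · intro hinf
      rcases List.infix_cons_iff.1 hinf with hpre | hinf'
      · have hqpre : q <+: rest := pvFSplit_head_prefix sep rest q qs hq
        have : sep <+: c :: rest := hpre.trans ((List.cons_prefix_cons).2 ⟨rfl, hqpre⟩)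
        exact h ⟨List.length_pos_of_ne_nil hsep, List.isPrefixOf_iff_prefix.2 this⟩
      · exact ih q (by rw [hq]; exact List.mem_cons_self) hinf'
    · exact ih p (by rw [hq]; exact List.mem_cons.2 (Or.inr hp))

-- pieces are contiguous substrings of the input
theorem pvFSplit_infix (sep : List Char) (l : List Char) :
    ∀ p ∈ pvFSplit sep l, p <:+: l := by
  induction l using pvFSplit.induct sep with
  | case1 => intro p hp; simp [pvFSplit] at hp; simp [hp]
  | case2 c rest h ih =>
    intro p hp
    rw [pvFSplit, if_pos h] at hp
    rcases List.mem_cons.1 hp with rfl | hp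
    · exact List.nil_infix
    · exact (ih p hp).trans (List.drop_suffix _ _).isInfix
  | case3 c rest h hnil ih => exact absurd hnil (pvFSplit_ne_nil sep rest)
  | case4 c rest h q qs hq ih =>
    intro p hp
    rw [pvFSplit, if_neg h, hq] at hp
    rcases List.mem_cons.1 hp with rfl | hp
    · exact ((List.cons_prefix_cons).2 ⟨rfl, pvFSplit_head_prefix sep rest q qs hq⟩).isInfix
    · exact ((ih p (by rw [hq]; exact List.mem_cons.2 (Or.inr hp)))).trans (List.suffix_cons c rest).isInfix

-- no occurrence of the separator: splitting is trivial
theorem pvFSplit_of_not_infix (sep l : List Char) (h : ¬ sep <:+: l) : pvFSplit sep l = [l] := by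
  induction l using pvFSplit.induct sep with
  | case1 => simp [pvFSplit]
  | case2 c rest hc ih =>
    exact absurd (List.IsPrefix.isInfix (List.isPrefixOf_iff_prefix.1 hc.2)) h
  | case3 c rest hc hnil ih => exact absurd hnil (pvFSplit_ne_nil sep rest)
  | case4 c rest hc q qs hq ih =>
    have hrest : ¬ sep <:+: rest := fun hi => h (hi.trans (List.suffix_cons c rest).isInfix)
    rw [pvFSplit, if_neg hc, hq]
    have := ih hrest
    rw [hq] at this
    simp only [List.cons.injEq] at this
    rw [this.1, this.2]

-- PySem.Chars.splitOn agrees with the model (non-empty separator)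
theorem pvGo_eq (sep : List Char) (hsep : sep ≠ []) :
    ∀ fuel l cur acc, l.length < fuel →
      PySem.Chars.splitOn.go sep fuel l cur acc =
        acc.reverse ++ (match pvFSplit sep l with
          | [] => []
          | p :: ps => (cur.reverse ++ p) :: ps) := by
  intro fuel
  induction fuel with
  | zero => intro l cur acc h; omega
  | succ n ih =>
    intro l cur acc h
    cases l with
    | nil => simp [PySem.Chars.splitOn.go, pvFSplit]
    | cons c rest =>
      by_cases hp : sep.isPrefixOf (c :: rest)
      · have hlen : 0 < sep.length := List.length_pos_of_ne_nil hsep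
        have hdrop : (List.drop sep.length (c :: rest)).length < n := by
          simp only [List.length_drop, List.length_cons]
          simp only [List.length_cons] at h
          omega
        rw [show PySem.Chars.splitOn.go sep (n+1) (c :: rest) cur acc
              = PySem.Chars.splitOn.go sep n (List.drop sep.length (c :: rest)) [] (cur.reverse :: acc) by
            rw [PySem.Chars.splitOn.go]; simp [hp]]
        rw [ih _ _ _ hdrop]
        rw [pvFSplit, if_pos ⟨hlen, hp⟩]
        obtain ⟨q, qs, hq⟩ := List.exists_cons_of_ne_nil (pvFSplit_ne_nil sep (List.drop sep.length (c :: rest)))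
        rw [hq]
        simp
      · have hlen : rest.length < n := by simp only [List.length_cons] at h; omega
        rw [show PySem.Chars.splitOn.go sep (n+1) (c :: rest) cur acc
              = PySem.Chars.splitOn.go sep n rest (c :: cur) acc by
            rw [PySem.Chars.splitOn.go]; simp [hp]]
        rw [ih _ _ _ hlen]
        rw [pvFSplit, if_neg (fun hh => hp hh.2)]
        obtain ⟨q, qs, hq⟩ := List.exists_cons_of_ne_nil (pvFSplit_ne_nil sep rest)
        rw [hq]
        simp

theorem pvSplitOn_eq (s sep : List Char) (hsep : sep ≠ []) :
    PySem.Chars.splitOn s sep = pvFSplit sep s := by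
  rw [PySem.Chars.splitOn, pvGo_eq sep hsep (s.length + 1) s [] [] (by omega)]
  obtain ⟨q, qs, hq⟩ := List.exists_cons_of_ne_nil (pvFSplit_ne_nil sep s)
  rw [hq]
  simp

-- membership in pvSplitPy, reflected to lists
theorem pvMem_splitPy {p q : String} {d : String} (hd : d.toList ≠ [])
    (hp : p ∈ pvSplitPy q d) : p.toList ∈ pvFSplit d.toList q.toList := by
  rw [pvSplitPy, pvSplitOn_eq _ _ hd] at hp
  rcases List.mem_map.1 hp with ⟨lp, hlp, rfl⟩
  rwa [String.toList_ofList]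

-- a split on a delimiter that does not occur is the identity
theorem pvSplitPy_trivial (p d : String) (hd : d.toList ≠ [])
    (h : ¬ d.toList <:+: p.toList) : pvSplitPy p d = [p] := by
  rw [pvSplitPy, pvSplitOn_eq _ _ hd, pvFSplit_of_not_infix _ _ h]
  simp

theorem pvFlatMap_id {X : List String} {f : String → List String}
    (h : ∀ p ∈ X, f p = [p]) : X.flatMap f = X := by
  induction X with
  | nil => rfl
  | cons x xs ih =>
    simp only [List.flatMap_cons, h x List.mem_cons_self,
      ih (fun p hp => h p (List.mem_cons.2 (Or.inr hp)))]
    rfl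

-- B's recursion = A's delimiter-by-delimiter foldl
theorem pvExplode_foldl : ∀ (ds : List String) (parts : List String),
    parts.flatMap (pvAltExplode ds) =
      ds.foldl (fun ps d => ps.flatMap (fun p => pvSplitPy p d)) parts := by
  intro ds
  induction ds with
  | nil => intro parts; simp [pvAltExplode]
  | cons d rest ih =>
    intro parts
    simp only [List.foldl_cons, ← ih]
    show parts.flatMap (fun part => (pvSplitPy part d).flatMap (pvAltExplode rest)) = _
    rw [← List.flatMap_assoc]

-- every piece after the ' and ', ' then ', '. ' splits contains neither ' and ' nor ' then '
theorem pvParts3_clean (text p : String)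
    (hp : p ∈ ((([text].flatMap (fun t => pvSplitPy t " and ")).flatMap
        (fun t => pvSplitPy t " then ")).flatMap (fun t => pvSplitPy t ". "))) :
    ¬ (" and ".toList <:+: p.toList) ∧ ¬ (" then ".toList <:+: p.toList) := by
  rcases List.mem_flatMap.1 hp with ⟨q, hq, hpq⟩
  rcases List.mem_flatMap.1 hq with ⟨r, hr, hqr⟩
  rcases List.mem_flatMap.1 hr with ⟨t, ht, hrt⟩
  have hrt' := pvMem_splitPy (by decide) hrt
  have hqr' := pvMem_splitPy (by decide) hqr
  have hpq' := pvMem_splitPy (by decide) hpq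
  have hand_r : ¬ (" and ".toList <:+: r.toList) :=
    pvFSplit_not_infix _ (by decide) _ _ hrt'
  have hthen_q : ¬ (" then ".toList <:+: q.toList) :=
    pvFSplit_not_infix _ (by decide) _ _ hqr'
  have hq_sub_r : q.toList <:+: r.toList := pvFSplit_infix _ _ _ hqr'
  have hp_sub_q : p.toList <:+: q.toList := pvFSplit_infix _ _ _ hpq'
  constructor
  · intro hinf
    exact hand_r (hinf.trans (hp_sub_q.trans hq_sub_r))
  · intro hinf
    exact hthen_q (hinf.trans hp_sub_q)

-- ===== VERDICT (by name: the statement is the Claim_ definition above) =====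
theorem split_compound_request_spec : Claim_equal_split_compound_request := by
  intro text _
  unfold Spec_split_compound_request split_compound_request split_compound_request_alt
  simp only [List.foldl_cons, List.foldl_nil, PySem.List.foldl_append_eq_flatMap,
    List.nil_append]
  rw [show pvAltExplode [" and ", " then ", ". ", "; "] text
        = List.flatMap (pvAltExplode [" and ", " then ", ". ", "; "]) [text] from
      (List.flatMap_singleton _ _).symm]
  rw [pvExplode_foldl]
  simp only [List.foldl_cons, List.foldl_nil]
  -- the two dead delimiters change nothing
  have h4 : ((([text].flatMap (fun t => pvSplitPy t " and ")).flatMap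
        (fun t => pvSplitPy t " then ")).flatMap (fun t => pvSplitPy t ". ")).flatMap
        (fun t => pvSplitPy t ", and ")
      = (([text].flatMap (fun t => pvSplitPy t " and ")).flatMap
        (fun t => pvSplitPy t " then ")).flatMap (fun t => pvSplitPy t ". ") := by
    apply pvFlatMap_id
    intro p hp
    apply pvSplitPy_trivial _ _ (by decide)
    intro hinf
    exact (pvParts3_clean text p hp).1
      ((by decide : " and ".toList <:+ ", and ".toList).isInfix.trans hinf)
  have h5 : ∀ X : List String,
      (∀ p ∈ X, ¬ (" then ".toList <:+: p.toList)) →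
      X.flatMap (fun t => pvSplitPy t ", then ") = X := by
    intro X hX
    apply pvFlatMap_id
    intro p hp
    apply pvSplitPy_trivial _ _ (by decide)
    intro hinf
    exact hX p hp ((by decide : " then ".toList <:+ ", then ".toList).isInfix.trans hinf)
  rw [h4, h5 _ (fun p hp => (pvParts3_clean text p hp).2)]
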